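-- pv_equiv track=rewrite | github.com/DreamSpoon/py_recorder | py_recorder/record/info/func.py | filter_info_lines
-- ===== SOURCE A (Python) =====
-- LINETYPE_CONTEXT = "CONTEXT"
--
-- LINETYPE_MACRO = "MACRO"
--
-- LINETYPE_INFO = "INFO"
--
-- LINETYPE_OPERATION = "OPERATION"
--
-- LINETYPE_PREV_DUP = "PREV_DUP"
--
-- LINETYPE_PY_REC = "PY_REC"
--
-- def check_add_prev_lines(line, split_str, prev_lines):
--     if split_str != "":
--         line = line.partition(split_str)[0]
--     is_prev = prev_lines.get(line) != None
--     if is_prev: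
--         return True
--     else:
--         prev_lines[line] = True
--         return False
--
-- def filter_info_lines(info_lines, copy_start_line_offset, filter_line_count, include_line_types):
--     if info_lines is None or include_line_types is None or len(include_line_types) < 1:
--         return []
--     filtered_lines = []
--     include_context = LINETYPE_CONTEXT in include_line_types
--     include_info = LINETYPE_INFO in include_line_types
--     include_macro = LINETYPE_MACRO in include_line_types
--     include_operation = LINETYPE_OPERATION in include_line_types
--     include_prev_dup = LINETYPE_PREV_DUP in include_line_types
--     include_py_rec = LINETYPE_PY_REC in include_line_types
--     # filter by copy start line offset (ascending order)
--     if copy_start_line_offset != None and copy_start_line_offset > 0: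
--         info_lines = info_lines[copy_start_line_offset:]
--     # filter by line type
--     prev_lines = {}
--     # traverse info_lines array in reverse order, because of previous duplicate checking
--     for l in reversed(info_lines):
--         if l.startswith("bpy.ops.py_rec"):
--             if include_py_rec:
--                 is_dup = check_add_prev_lines(l, "(", prev_lines)
--                 if is_dup and not include_prev_dup:
--                     continue
--                 filtered_lines.append( (LINETYPE_PY_REC, is_dup, l) )
--         elif l.startswith("bpy.context.window_manager.py_rec"):
--             if include_py_rec:
--                 is_dup = check_add_prev_lines(l, "=", prev_lines)
--                 if is_dup and not include_prev_dup:
--                     continue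
--                 filtered_lines.append( (LINETYPE_PY_REC, is_dup, l) )
--         elif l.startswith("bpy.ops"):
--             if include_operation:
--                 is_dup = check_add_prev_lines(l, "(", prev_lines)
--                 if is_dup and not include_prev_dup:
--                     continue
--                 filtered_lines.append( (LINETYPE_OPERATION, is_dup, l) )
--         elif l.startswith("bpy.data.window_managers[\"WinMan\"].(null)"):
--             if include_macro:
--                 is_dup = check_add_prev_lines(l, "", prev_lines)
--                 if is_dup and not include_prev_dup:
--                     continue
--                 filtered_lines.append( (LINETYPE_MACRO, is_dup, l) )
--         elif l.startswith("bpy.context"):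
--             if include_context:
--                 is_dup = check_add_prev_lines(l, "=", prev_lines)
--                 if is_dup and not include_prev_dup:
--                     continue
--                 filtered_lines.append( (LINETYPE_CONTEXT, is_dup, l) )
--         elif include_info:
--             is_dup = check_add_prev_lines(l, "", prev_lines)
--             if is_dup and not include_prev_dup:
--                 continue
--             filtered_lines.append( (LINETYPE_INFO, is_dup, l) )
--     # reverse the reversed order
--     filtered_lines = [fl for fl in reversed(filtered_lines)]
--     # filter by line count
--     if filter_line_count != None and filter_line_count > 0:
--         filtered_lines = filtered_lines[-filter_line_count:]
--     return filtered_lines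
-- ===== SOURCE B (Python) =====
-- LINETYPE_CONTEXT = "CONTEXT"
-- LINETYPE_MACRO = "MACRO"
-- LINETYPE_INFO = "INFO"
-- LINETYPE_OPERATION = "OPERATION"
-- LINETYPE_PREV_DUP = "PREV_DUP"
-- LINETYPE_PY_REC = "PY_REC"
--
-- def filter_info_lines(info_lines, copy_start_line_offset, filter_line_count, include_line_types):
--     if info_lines is None or include_line_types is None or len(include_line_types) < 1:
--         return []
--     include_context = LINETYPE_CONTEXT in include_line_types
--     include_info = LINETYPE_INFO in include_line_types
--     include_macro = LINETYPE_MACRO in include_line_types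
--     include_operation = LINETYPE_OPERATION in include_line_types
--     include_prev_dup = LINETYPE_PREV_DUP in include_line_types
--     include_py_rec = LINETYPE_PY_REC in include_line_types
--     lines = info_lines
--     if copy_start_line_offset is not None and copy_start_line_offset > 0:
--         lines = lines[copy_start_line_offset:]
--
--     def classify(l):
--         if l.startswith("bpy.ops.py_rec"):
--             return (LINETYPE_PY_REC, include_py_rec, l.partition("(")[0])
--         if l.startswith("bpy.context.window_manager.py_rec"):
--             return (LINETYPE_PY_REC, include_py_rec, l.partition("=")[0])
--         if l.startswith("bpy.ops"):
--             return (LINETYPE_OPERATION, include_operation, l.partition("(")[0])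
--         if l.startswith("bpy.data.window_managers[\"WinMan\"].(null)"):
--             return (LINETYPE_MACRO, include_macro, l)
--         if l.startswith("bpy.context"):
--             return (LINETYPE_CONTEXT, include_context, l.partition("=")[0])
--         return (LINETYPE_INFO, include_info, l)
--
--     # pass 1: count occurrences of each dedup key among included lines
--     counts = {}
--     for l in lines:
--         _t, inc, key = classify(l)
--         if inc:
--             counts[key] = counts.get(key, 0) + 1
--     # pass 2: emit forward; a line is a duplicate iff its key occurs again later
--     out = []
--     for l in lines:
--         t, inc, key = classify(l)
--         if not inc:
--             continue
--         counts[key] -= 1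
--         is_dup = counts[key] > 0
--         if is_dup and not include_prev_dup:
--             continue
--         out.append((t, is_dup, l))
--     if filter_line_count is not None and filter_line_count > 0:
--         out = out[-filter_line_count:]
--     return out
-- ===== Notes on version B (the rewrite author's own statement) =====
-- stated objective: alternative
-- what changed: Replaces the reverse-order single pass with a running seen-dict by two forward passes: first count each dedup key's occurrences among included lines, then emit forward, decrementing the counter so is_dup = (key occurs again later); output is built in natural order with no final reversal.
import Mathlib
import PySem

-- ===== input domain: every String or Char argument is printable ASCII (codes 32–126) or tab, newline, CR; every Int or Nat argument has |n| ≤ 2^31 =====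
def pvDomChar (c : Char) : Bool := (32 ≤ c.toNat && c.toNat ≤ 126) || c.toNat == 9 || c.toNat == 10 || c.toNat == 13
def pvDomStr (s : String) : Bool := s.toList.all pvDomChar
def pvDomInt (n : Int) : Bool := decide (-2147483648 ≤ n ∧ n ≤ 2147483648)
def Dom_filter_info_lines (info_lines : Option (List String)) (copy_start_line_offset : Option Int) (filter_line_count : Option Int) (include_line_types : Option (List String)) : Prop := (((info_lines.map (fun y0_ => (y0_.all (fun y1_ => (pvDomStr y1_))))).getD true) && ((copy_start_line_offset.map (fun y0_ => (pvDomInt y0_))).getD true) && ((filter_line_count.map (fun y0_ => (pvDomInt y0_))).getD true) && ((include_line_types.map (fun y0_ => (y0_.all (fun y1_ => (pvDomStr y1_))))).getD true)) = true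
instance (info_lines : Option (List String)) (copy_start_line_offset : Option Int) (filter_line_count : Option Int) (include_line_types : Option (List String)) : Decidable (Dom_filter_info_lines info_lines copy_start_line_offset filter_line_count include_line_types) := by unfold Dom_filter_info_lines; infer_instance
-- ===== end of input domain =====

-- ===== PORT A =====
-- B reworks the dedup as two forward counting passes instead of A's reverse pass with a seen-dict (objective: alternative).

-- shared helper: Python's line.partition(sep)[0] (prefix before the first occurrence of sep, or the whole line)
def pvPartHead (l sep : String) : String :=
  let i := PySem.Str.find l sep
  if i = -1 then l else PySem.Str.slice l none (some i)

def check_add_prev_lines (line split_str : String) (prev_lines : PySem.Dict String Bool) :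
    Bool × PySem.Dict String Bool :=
  let line := if split_str = "" then line else pvPartHead line split_str
  if (prev_lines.get? line).isSome then (true, prev_lines)
  else (false, prev_lines.insert line true)

def filterA_step (incC incI incM incO incPD incPR : Bool)
    (st : PySem.Dict String Bool × List (String × Bool × String)) (l : String) :
    PySem.Dict String Bool × List (String × Bool × String) :=
  if PySem.Str.startswith l "bpy.ops.py_rec" then
    if incPR then
      let r := check_add_prev_lines l "(" st.1
      if r.1 && !incPD then (r.2, st.2) else (r.2, st.2 ++ [("PY_REC", r.1, l)])
    else st
  else if PySem.Str.startswith l "bpy.context.window_manager.py_rec" then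
    if incPR then
      let r := check_add_prev_lines l "=" st.1
      if r.1 && !incPD then (r.2, st.2) else (r.2, st.2 ++ [("PY_REC", r.1, l)])
    else st
  else if PySem.Str.startswith l "bpy.ops" then
    if incO then
      let r := check_add_prev_lines l "(" st.1
      if r.1 && !incPD then (r.2, st.2) else (r.2, st.2 ++ [("OPERATION", r.1, l)])
    else st
  else if PySem.Str.startswith l "bpy.data.window_managers[\"WinMan\"].(null)" then
    if incM then
      let r := check_add_prev_lines l "" st.1
      if r.1 && !incPD then (r.2, st.2) else (r.2, st.2 ++ [("MACRO", r.1, l)])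
    else st
  else if PySem.Str.startswith l "bpy.context" then
    if incC then
      let r := check_add_prev_lines l "=" st.1
      if r.1 && !incPD then (r.2, st.2) else (r.2, st.2 ++ [("CONTEXT", r.1, l)])
    else st
  else
    if incI then
      let r := check_add_prev_lines l "" st.1
      if r.1 && !incPD then (r.2, st.2) else (r.2, st.2 ++ [("INFO", r.1, l)])
    else st

def filter_info_lines (info_lines : Option (List String)) (copy_start_line_offset : Option Int) (filter_line_count : Option Int) (include_line_types : Option (List String)) : List (String × Bool × String) :=
  match info_lines, include_line_types with
  | none, _ => []
  | _, none => []
  | some ils, some types =>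
    if types.length < 1 then []
    else
      let incC := types.contains "CONTEXT"
      let incI := types.contains "INFO"
      let incM := types.contains "MACRO"
      let incO := types.contains "OPERATION"
      let incPD := types.contains "PREV_DUP"
      let incPR := types.contains "PY_REC"
      let ils := match copy_start_line_offset with
        | some off => if 0 < off then PySem.List.slice ils (some off) none else ils
        | none => ils
      let filtered := ((ils.reverse).foldl (filterA_step incC incI incM incO incPD incPR) (PySem.Dict.empty, [])).2
      let filtered := filtered.reverse
      match filter_line_count with
      | some c => if 0 < c then PySem.List.slice filtered (some (-c)) none else filtered
      | none => filtered

-- ===== PORT B =====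
-- classify(l) from Source B: (line type, whether included, dedup key)
def filterB_classify (incC incI incM incO incPR : Bool) (l : String) : String × Bool × String :=
  if PySem.Str.startswith l "bpy.ops.py_rec" then ("PY_REC", incPR, pvPartHead l "(")
  else if PySem.Str.startswith l "bpy.context.window_manager.py_rec" then ("PY_REC", incPR, pvPartHead l "=")
  else if PySem.Str.startswith l "bpy.ops" then ("OPERATION", incO, pvPartHead l "(")
  else if PySem.Str.startswith l "bpy.data.window_managers[\"WinMan\"].(null)" then ("MACRO", incM, l)
  else if PySem.Str.startswith l "bpy.context" then ("CONTEXT", incC, pvPartHead l "=")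
  else ("INFO", incI, l)

-- pass 1 of Source B: counts[key] = number of included lines with that key
def filterB_counts (incC incI incM incO incPR : Bool) (lines : List String) : PySem.Dict String Int :=
  lines.foldl (fun d l =>
    let tik := filterB_classify incC incI incM incO incPR l
    if tik.2.1 then d.insert tik.2.2 (d.getD tik.2.2 0 + 1) else d) PySem.Dict.empty

-- pass 2 of Source B: emit forward, decrementing the counter
def filterB_emit (incC incI incM incO incPR incPD : Bool) :
    List String → PySem.Dict String Int → List (String × Bool × String)
  | [], _ => []
  | l :: rest, cnt =>
    let tik := filterB_classify incC incI incM incO incPR l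
    if tik.2.1 then
      let cnt := cnt.insert tik.2.2 (cnt.getD tik.2.2 0 - 1)
      let is_dup := decide (0 < cnt.getD tik.2.2 0)
      if is_dup && !incPD then filterB_emit incC incI incM incO incPR incPD rest cnt
      else (tik.1, is_dup, l) :: filterB_emit incC incI incM incO incPR incPD rest cnt
    else filterB_emit incC incI incM incO incPR incPD rest cnt

def filter_info_lines_alt (info_lines : Option (List String)) (copy_start_line_offset : Option Int) (filter_line_count : Option Int) (include_line_types : Option (List String)) : List (String × Bool × String) :=
  match info_lines, include_line_types with
  | none, _ => []
  | _, none => []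
  | some ils, some types =>
    if types.length < 1 then []
    else
      let incC := types.contains "CONTEXT"
      let incI := types.contains "INFO"
      let incM := types.contains "MACRO"
      let incO := types.contains "OPERATION"
      let incPD := types.contains "PREV_DUP"
      let incPR := types.contains "PY_REC"
      let lines := match copy_start_line_offset with
        | some off => if 0 < off then PySem.List.slice ils (some off) none else ils
        | none => ils
      let out := filterB_emit incC incI incM incO incPR incPD lines
        (filterB_counts incC incI incM incO incPR lines)
      match filter_line_count with
      | some c => if 0 < c then PySem.List.slice out (some (-c)) none else out
      | none => out

-- ===== PRECONDITION & SPEC =====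
def Spec_filter_info_lines (info_lines : Option (List String)) (copy_start_line_offset : Option Int) (filter_line_count : Option Int) (include_line_types : Option (List String)) (out : List (String × Bool × String)) : Prop := out = filter_info_lines_alt info_lines copy_start_line_offset filter_line_count include_line_types
instance (info_lines : Option (List String)) (copy_start_line_offset : Option Int) (filter_line_count : Option Int) (include_line_types : Option (List String)) (out : List (String × Bool × String)) : Decidable (Spec_filter_info_lines info_lines copy_start_line_offset filter_line_count include_line_types out) := by unfold Spec_filter_info_lines; infer_instance

-- ===== CLAIM (what is proved, stated in full; the proofs are below) =====
def Claim_equal_filter_info_lines : Prop := ∀ (info_lines : Option (List String)) (copy_start_line_offset : Option Int) (filter_line_count : Option Int) (include_line_types : Option (List String)), Dom_filter_info_lines info_lines copy_start_line_offset filter_line_count include_line_types → Spec_filter_info_lines info_lines copy_start_line_offset filter_line_count include_line_types (filter_info_lines info_lines copy_start_line_offset filter_line_count include_line_types)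

-- ===== LEMMAS AND PROOFS =====

-- the predicate "line l is included and has dedup key k"
def pvIncKey (incC incI incM incO incPR : Bool) (k : String) (l : String) : Bool :=
  (filterB_classify incC incI incM incO incPR l).2.1 &&
    ((filterB_classify incC incI incM incO incPR l).2.2 == k)

-- one include-branch of A's step, normalised
theorem pvBranch_eq (incX incPD : Bool) (t sp k : String) (d : PySem.Dict String Bool)
    (a : List (String × Bool × String)) (l : String)
    (hk : (if sp = "" then l else pvPartHead l sp) = k) :
    (if incX then
       (let r := check_add_prev_lines l sp d
        if r.1 && !incPD then (r.2, a) else (r.2, a ++ [(t, r.1, l)]))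
     else (d, a)) =
    (if incX then
       (if (d.get? k).isSome then (d, if incPD then a ++ [(t, true, l)] else a)
        else (d.insert k true, a ++ [(t, false, l)]))
     else (d, a)) := by
  subst hk
  cases incX
  · simp
  · simp only [check_add_prev_lines]
    by_cases hs : (d.get? (if sp = "" then l else pvPartHead l sp)).isSome
    · cases incPD <;> simp [hs]
    · cases incPD <;> simp [hs]

-- A's step, normalised through classify
theorem filterA_step_eq (incC incI incM incO incPD incPR : Bool)
    (d : PySem.Dict String Bool) (a : List (String × Bool × String)) (l : String) :
    filterA_step incC incI incM incO incPD incPR (d, a) l =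
      (let tik := filterB_classify incC incI incM incO incPR l
       if tik.2.1 then
         if (d.get? tik.2.2).isSome then
           (d, if incPD then a ++ [(tik.1, true, l)] else a)
         else (d.insert tik.2.2 true, a ++ [(tik.1, false, l)])
       else (d, a)) := by
  by_cases h1 : PySem.Str.startswith l "bpy.ops.py_rec" = true
  · simp only [filterA_step, filterB_classify, h1, if_true]
    exact pvBranch_eq incPR incPD "PY_REC" "(" _ d a l (by simp)
  · by_cases h2 : PySem.Str.startswith l "bpy.context.window_manager.py_rec" = true
    · simp only [filterA_step, filterB_classify, h1, h2, Bool.false_eq_true, if_false, if_true]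
      exact pvBranch_eq incPR incPD "PY_REC" "=" _ d a l (by simp)
    · by_cases h3 : PySem.Str.startswith l "bpy.ops" = true
      · simp only [filterA_step, filterB_classify, h1, h2, h3, Bool.false_eq_true, if_false, if_true]
        exact pvBranch_eq incO incPD "OPERATION" "(" _ d a l (by simp)
      · by_cases h4 : PySem.Str.startswith l "bpy.data.window_managers[\"WinMan\"].(null)" = true
        · simp only [filterA_step, filterB_classify, h1, h2, h3, h4, Bool.false_eq_true, if_false, if_true]
          exact pvBranch_eq incM incPD "MACRO" "" _ d a l (by simp)
        · by_cases h5 : PySem.Str.startswith l "bpy.context" = true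
          · simp only [filterA_step, filterB_classify, h1, h2, h3, h4, h5, Bool.false_eq_true, if_false, if_true]
            exact pvBranch_eq incC incPD "CONTEXT" "=" _ d a l (by simp)
          · simp only [filterA_step, filterB_classify, h1, h2, h3, h4, h5, Bool.false_eq_true, if_false]
            exact pvBranch_eq incI incPD "INFO" "" _ d a l (by simp)

-- the dict built by A's fold knows key k iff some processed line is included with key k
theorem filterA_fold_get? (incC incI incM incO incPD incPR : Bool) :
    ∀ (xs : List String) (d : PySem.Dict String Bool) (a : List (String × Bool × String)) (k : String),
      (((xs.foldl (filterA_step incC incI incM incO incPD incPR) (d, a)).1).get? k).isSome =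
        ((d.get? k).isSome || xs.any (pvIncKey incC incI incM incO incPR k)) := by
  intro xs
  induction xs with
  | nil => simp
  | cons l rest ih =>
    intro d a k
    simp only [List.foldl_cons, List.any_cons, filterA_step_eq]
    rcases h : filterB_classify incC incI incM incO incPR l with ⟨t, inc, kk⟩
    cases inc with
    | false => simp [ih, pvIncKey, h]
    | true =>
      by_cases hd : (d.get? kk).isSome = true
      · by_cases hk : kk = k
        · subst hk; simp [hd, ih, pvIncKey, h]
        · have hbeq : (kk == k) = false := by simp [hk]
          simp [hd, ih, pvIncKey, h, hbeq]
      · simp only [Bool.not_eq_true] at hd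
        by_cases hk : k = kk
        · subst hk
          simp [hd, ih, pvIncKey, h]
        · have hbeq : (kk == k) = false := by simp [Ne.symm hk]
          simp [hd, ih, pvIncKey, h, hbeq, PySem.Dict.get?_insert, hk]

-- B's pass-1 counter counts included lines per key
theorem filterB_counts_getD (incC incI incM incO incPR : Bool) :
    ∀ (xs : List String) (d : PySem.Dict String Int) (k : String),
      (xs.foldl (fun d l =>
          let tik := filterB_classify incC incI incM incO incPR l
          if tik.2.1 then d.insert tik.2.2 (d.getD tik.2.2 0 + 1) else d) d).getD k 0 =
        d.getD k 0 + (xs.countP (pvIncKey incC incI incM incO incPR k) : Int) := by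
  intro xs
  induction xs with
  | nil => simp
  | cons l rest ih =>
    intro d k
    simp only [List.foldl_cons, List.countP_cons]
    rcases h : filterB_classify incC incI incM incO incPR l with ⟨t, inc, kk⟩
    cases inc with
    | false => simp [h, ih, pvIncKey]
    | true =>
      simp only [if_true, ih]
      by_cases hk : kk = k
      · subst hk
        have hbeq : pvIncKey incC incI incM incO incPR kk l = true := by
          simp [pvIncKey, h]
        simp [hbeq]
        ring
      · have hbeq : pvIncKey incC incI incM incO incPR k l = false := by
          simp [pvIncKey, h, hk]
        have hk2 : ¬ k = kk := fun e => hk e.symm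
        simp [PySem.Dict.getD_insert, hk2, hbeq]

-- pass 2 depends on the counter only through getD
theorem filterB_emit_congr (incC incI incM incO incPR incPD : Bool) :
    ∀ (xs : List String) (c1 c2 : PySem.Dict String Int),
      (∀ k, c1.getD k 0 = c2.getD k 0) →
      filterB_emit incC incI incM incO incPR incPD xs c1 =
        filterB_emit incC incI incM incO incPR incPD xs c2 := by
  intro xs
  induction xs with
  | nil => intro _ _ _; rfl
  | cons l rest ih =>
    intro c1 c2 hc
    simp only [filterB_emit]
    rcases h : filterB_classify incC incI incM incO incPR l with ⟨t, inc, kk⟩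
    cases inc with
    | false => simp only [Bool.false_eq_true, if_false]; exact ih _ _ hc
    | true =>
      have hins : ∀ k, ((c1.insert kk (c1.getD kk 0 - 1)).getD k 0) =
          ((c2.insert kk (c2.getD kk 0 - 1)).getD k 0) := by
        intro k
        simp [PySem.Dict.getD_insert, hc]
      simp only [if_true]
      rw [hins kk, ih _ _ hins]

-- core equivalence of the two dedup loops
set_option maxHeartbeats 1000000 in
theorem pvCore (incC incI incM incO incPD incPR : Bool) :
    ∀ (lines : List String),
      ((lines.reverse.foldl (filterA_step incC incI incM incO incPD incPR)
          (PySem.Dict.empty, [])).2).reverse =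
        filterB_emit incC incI incM incO incPR incPD lines
          (filterB_counts incC incI incM incO incPR lines) := by
  intro lines
  induction lines with
  | nil => rfl
  | cons l rest ih =>
    have hrev : (l :: rest).reverse = rest.reverse ++ [l] := by simp
    rw [hrev, List.foldl_append]
    rcases hP : rest.reverse.foldl (filterA_step incC incI incM incO incPD incPR)
        (PySem.Dict.empty, []) with ⟨d, acc⟩
    have hacc : acc.reverse = filterB_emit incC incI incM incO incPR incPD rest
        (filterB_counts incC incI incM incO incPR rest) := by
      rw [← ih, hP]
    have hd : ∀ k, ((d.get? k).isSome) = rest.any (pvIncKey incC incI incM incO incPR k) := by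
      intro k
      have h0 := filterA_fold_get? incC incI incM incO incPD incPR rest.reverse
        PySem.Dict.empty [] k
      rw [hP] at h0
      simpa using h0
    simp only [List.foldl_cons, List.foldl_nil, filterA_step_eq]
    rcases hcl : filterB_classify incC incI incM incO incPR l with ⟨t, inc, kk⟩
    have hcnt : ∀ k, (filterB_counts incC incI incM incO incPR (l :: rest)).getD k 0 =
        ((if pvIncKey incC incI incM incO incPR k l then 1 else 0) : Int) +
          (rest.countP (pvIncKey incC incI incM incO incPR k) : Int) := by
      intro k
      have h0 := filterB_counts_getD incC incI incM incO incPR (l :: rest) PySem.Dict.empty k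
      simp only [filterB_counts]
      rw [h0]
      simp only [List.countP_cons]
      by_cases hk : pvIncKey incC incI incM incO incPR k l = true <;> simp [hk] <;> ring
    cases inc with
    | false =>
      have hkey' : ∀ k, pvIncKey incC incI incM incO incPR k l = false := by
        intro k; simp [pvIncKey, hcl]
      have hB : filterB_emit incC incI incM incO incPR incPD (l :: rest)
            (filterB_counts incC incI incM incO incPR (l :: rest)) =
          filterB_emit incC incI incM incO incPR incPD rest
            (filterB_counts incC incI incM incO incPR (l :: rest)) := by
        simp [filterB_emit, hcl]
      rw [hB]
      have h1 : filterB_emit incC incI incM incO incPR incPD rest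
            (filterB_counts incC incI incM incO incPR (l :: rest)) =
          filterB_emit incC incI incM incO incPR incPD rest
            (filterB_counts incC incI incM incO incPR rest) := by
        apply filterB_emit_congr
        intro k
        rw [hcnt k]
        have hr := filterB_counts_getD incC incI incM incO incPR rest PySem.Dict.empty k
        simp only [filterB_counts]
        rw [hr]
        simp [hkey' k]
      rw [h1, ← hacc]
      simp
    | true =>
      have hkey : pvIncKey incC incI incM incO incPR kk l = true := by
        simp [pvIncKey, hcl]
      have hkey' : ∀ k, k ≠ kk → pvIncKey incC incI incM incO incPR k l = false := by
        intro k hk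
        simp only [pvIncKey, hcl, Bool.true_and]
        exact beq_eq_false_iff_ne.mpr (Ne.symm hk)
      set cnt0 := filterB_counts incC incI incM incO incPR (l :: rest) with hc0
      have hB : filterB_emit incC incI incM incO incPR incPD (l :: rest) cnt0 =
          (let cnt := cnt0.insert kk (cnt0.getD kk 0 - 1)
           let is_dup := decide (0 < cnt.getD kk 0)
           if is_dup && !incPD then filterB_emit incC incI incM incO incPR incPD rest cnt
           else (t, is_dup, l) :: filterB_emit incC incI incM incO incPR incPD rest cnt) := by
        simp [filterB_emit, hcl]
      have hcnt' : ∀ k, (cnt0.insert kk (cnt0.getD kk 0 - 1)).getD k 0 =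
          (filterB_counts incC incI incM incO incPR rest).getD k 0 := by
        intro k
        have hr := filterB_counts_getD incC incI incM incO incPR rest PySem.Dict.empty k
        simp only [filterB_counts]
        rw [hr]
        by_cases hk : k = kk
        · rw [hk, PySem.Dict.getD_insert_self, hcnt kk]
          simp [hkey]
        · simp [PySem.Dict.getD_insert, hk, hcnt k, hkey' k hk]
      have htail : filterB_emit incC incI incM incO incPR incPD rest
            (cnt0.insert kk (cnt0.getD kk 0 - 1)) =
          filterB_emit incC incI incM incO incPR incPD rest
            (filterB_counts incC incI incM incO incPR rest) :=
        filterB_emit_congr incC incI incM incO incPR incPD rest _ _ hcnt'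
      have hval : (cnt0.insert kk (cnt0.getD kk 0 - 1)).getD kk 0 =
          ((rest.countP (pvIncKey incC incI incM incO incPR kk) : Int)) := by
        rw [hcnt' kk]
        have hr := filterB_counts_getD incC incI incM incO incPR rest PySem.Dict.empty kk
        simp only [filterB_counts]
        rw [hr]
        simp
      have hdup : (d.get? kk).isSome =
          decide (0 < (cnt0.insert kk (cnt0.getD kk 0 - 1)).getD kk 0) := by
        rw [hd kk, Bool.eq_iff_iff]
        simp only [decide_eq_true_eq]
        rw [hval]
        simp [List.any_eq_true, List.countP_pos_iff, Int.natCast_pos]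
      by_cases hdu : (d.get? kk).isSome = true
      · have hdu' : decide (0 < (cnt0.insert kk (cnt0.getD kk 0 - 1)).getD kk 0) = true := by
          rw [← hdup]; exact hdu
        rw [hB]
        simp only [hdu, hdu', if_true]
        cases incPD with
        | false =>
          simp only [Bool.not_false, Bool.and_true, if_true, htail, ← hacc]
          simp
        | true =>
          simp only [Bool.not_true, Bool.and_false, Bool.false_eq_true, if_false, htail, ← hacc]
          simp
      · simp only [Bool.not_eq_true] at hdu
        have hdu' : decide (0 < (cnt0.insert kk (cnt0.getD kk 0 - 1)).getD kk 0) = false := by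
          rw [← hdup]; simp [hdu]
        rw [hB]
        simp only [hdu', Bool.false_and, Bool.false_eq_true, if_false, htail, ← hacc]
        simp [hdu]

-- ===== VERDICT (by name: the statement is the Claim_ definition above) =====
theorem filter_info_lines_spec : Claim_equal_filter_info_lines := by
  intro info_lines copy_start_line_offset filter_line_count include_line_types _
  unfold Spec_filter_info_lines filter_info_lines filter_info_lines_alt
  match info_lines, include_line_types with
  | none, _ => rfl
  | some ils, none => rfl
  | some ils, some types =>
    simp only
    by_cases hl : types.length < 1
    · simp [hl]
    · simp only [hl, if_false]
      rw [pvCore]
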